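-- pv_equiv track=rewrite | github.com/manatk/cryptography | crypto.py | encrypt_mhkc
-- ===== SOURCE A (Python) =====
-- def encrypt_mhkc(plaintext, public_key):
--     bin_value_list = []
--     n = 8
--     A = []
--     C = []
--     sum = 0
--     for character in plaintext:
--         for binary in bin(ord(character))[2:].zfill(n):
--             bin_value_list.append(int(binary))
--         A.append(bin_value_list)
--         bin_value_list = []
--     for binary_list in A:
--         for i in range(0, len(binary_list)):
--             sum = sum + (binary_list[i] * public_key[i])
--         C.append(sum)
--         sum = 0
--     return(C)
-- ===== SOURCE B (Python) =====
-- def encrypt_mhkc(plaintext, public_key):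
--     C = []
--     for ch in plaintext:
--         code = ord(ch)
--         C.append(sum(public_key[i] for i in range(8) if (code >> (7 - i)) & 1))
--     return C
-- ===== Notes on version B (the rewrite author's own statement) =====
-- stated objective: simpler
-- what changed: B eliminates A's materialized table of 8-bit lists and its second pass: a single loop computes each ciphertext entry directly as the sum of public_key[i] over the set bit positions of the character code (bit test by shift-and-mask instead of building digit lists).
import Mathlib
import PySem

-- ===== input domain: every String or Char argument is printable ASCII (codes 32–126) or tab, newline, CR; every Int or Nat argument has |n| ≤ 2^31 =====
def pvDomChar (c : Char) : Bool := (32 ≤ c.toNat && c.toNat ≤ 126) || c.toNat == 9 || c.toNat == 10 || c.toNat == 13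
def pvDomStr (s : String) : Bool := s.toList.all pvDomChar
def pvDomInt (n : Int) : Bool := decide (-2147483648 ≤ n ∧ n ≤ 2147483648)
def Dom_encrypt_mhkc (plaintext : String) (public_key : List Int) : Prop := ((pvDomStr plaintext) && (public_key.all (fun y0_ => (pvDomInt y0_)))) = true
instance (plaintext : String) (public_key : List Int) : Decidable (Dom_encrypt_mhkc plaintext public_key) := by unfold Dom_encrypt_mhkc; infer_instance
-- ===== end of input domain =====

-- B fuses A's two phases: no intermediate table of bit-lists; one pass summing key entries at set-bit positions (objective: simpler).

-- ===== PORT A =====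
-- bin(n)[2:]: binary digits of n, most significant first ('' for 0); fuel = n is enough since n halves each step
def pyBinAux : Nat → Nat → List Nat
  | 0, _ => []
  | fuel+1, n => if n = 0 then [] else pyBinAux fuel (n / 2) ++ [n % 2]

def pyBin (n : Nat) : List Nat := pyBinAux n n

def encrypt_mhkc (plaintext : String) (public_key : List Int) : List Int :=
  -- first loop: build A, the list of 8-bit lists (zfill pads with leading zeros)
  let A : List (List Int) := plaintext.toList.foldl
    (fun acc c =>
      let bl : List Int := (List.replicate (8 - (pyBin c.toNat).length) 0 ++ pyBin c.toNat).map Int.ofNat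
      acc ++ [bl]) []
  -- second loop: dot product of each bit list with public_key (index valid under Pre_)
  A.foldl
    (fun C bl =>
      C ++ [(List.range bl.length).foldl (fun sum i => sum + bl.getD i 0 * public_key.getD i 0) 0]) []

-- ===== PORT B =====
def encrypt_mhkc_alt (plaintext : String) (public_key : List Int) : List Int :=
  plaintext.toList.map (fun c =>
    (List.range 8).foldl
      (fun s i => if (c.toNat >>> (7 - i)) % 2 = 1 then s + public_key.getD i 0 else s) 0)

-- ===== PRECONDITION & SPEC =====
-- A indexes public_key[0..7] for every character, so it raises IndexError when the
-- plaintext is nonempty and the key has fewer than 8 entries; Pre_ excludes exactly that.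
def Pre_encrypt_mhkc (plaintext : String) (public_key : List Int) : Prop :=
  plaintext.toList = [] ∨ ∀ i ∈ [0, 1, 2, 3, 4, 5, 6, 7], i < public_key.length
instance (plaintext : String) (public_key : List Int) : Decidable (Pre_encrypt_mhkc plaintext public_key) := by unfold Pre_encrypt_mhkc; infer_instance

def pvWitness_encrypt_mhkc : String × List Int := ("Hi", [2, 3, 5, 7, 11, 13, 17, 19])

def Spec_encrypt_mhkc (plaintext : String) (public_key : List Int) (out : List Int) : Prop := out = encrypt_mhkc_alt plaintext public_key
instance (plaintext : String) (public_key : List Int) (out : List Int) : Decidable (Spec_encrypt_mhkc plaintext public_key out) := by unfold Spec_encrypt_mhkc; infer_instance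

-- ===== CLAIM (what is proved, stated in full; the proofs are below) =====
def Claim_equal_encrypt_mhkc : Prop := ∀ (plaintext : String) (public_key : List Int), Dom_encrypt_mhkc plaintext public_key → Pre_encrypt_mhkc plaintext public_key → Spec_encrypt_mhkc plaintext public_key (encrypt_mhkc plaintext public_key)

-- ===== LEMMAS AND PROOFS =====

-- the zfill(8)-padded binary digits of n < 128 are exactly the 8 bits msb-first
theorem pvBits_eq : ∀ n < 128,
    List.replicate (8 - (pyBin n).length) 0 ++ pyBin n
      = (List.range 8).map (fun i => (n >>> (7 - i)) % 2) := by decide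

theorem pvStep (s k : Int) (m : Nat) :
    s + ((m % 2 : Nat) : Int) * k = if m % 2 = 1 then s + k else s := by
  rcases Nat.mod_two_eq_zero_or_one m with h | h <;> simp [h]

theorem pvChar_eq (n : Nat) (hn : n < 128) (key : List Int) :
    (List.range ((List.replicate (8 - (pyBin n).length) 0 ++ pyBin n).map Int.ofNat).length).foldl
        (fun sum i =>
          sum + ((List.replicate (8 - (pyBin n).length) 0 ++ pyBin n).map Int.ofNat).getD i 0 * key.getD i 0) 0
      = (List.range 8).foldl
          (fun s i => if (n >>> (7 - i)) % 2 = 1 then s + key.getD i 0 else s) 0 := by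
  rw [pvBits_eq n hn]
  simp only [List.map_map, List.length_map, List.length_range]
  refine PySem.List.foldl_congr_mem _ _ _ _ ?_
  intro acc i hi
  have hi8 : i < 8 := List.mem_range.mp hi
  have hg : ((List.range 8).map (Int.ofNat ∘ fun i => n >>> (7 - i) % 2)).getD i 0
      = ((n >>> (7 - i) % 2 : Nat) : Int) := by
    simp [List.getD_eq_getElem?_getD, hi8]
  rw [hg]
  exact pvStep acc (key.getD i 0) (n >>> (7 - i))

theorem encrypt_mhkc_eq (plaintext : String) (public_key : List Int)
    (hdom : Dom_encrypt_mhkc plaintext public_key) :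
    encrypt_mhkc plaintext public_key = encrypt_mhkc_alt plaintext public_key := by
  unfold encrypt_mhkc encrypt_mhkc_alt
  simp only [PySem.List.foldl_append_singleton_eq_map, List.nil_append, List.map_map]
  refine List.map_congr_left ?_
  intro c hc
  have hch : pvDomChar c = true := by
    unfold Dom_encrypt_mhkc pvDomStr at hdom
    simp only [Bool.and_eq_true, List.all_eq_true] at hdom
    exact hdom.1 c hc
  have h128 : c.toNat < 128 := by
    simp [pvDomChar] at hch; omega
  exact pvChar_eq c.toNat h128 public_key

-- ===== VERDICT (by name: the statement is the Claim_ definition above) =====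
theorem encrypt_mhkc_spec : Claim_equal_encrypt_mhkc := by
  intro plaintext public_key hdom _
  exact encrypt_mhkc_eq plaintext public_key hdom
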